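-- pv_equiv track=rewrite | github.com/JosueAmaral15/Egg-Cell-Compactor | Egg Cell Compactor 1.6.1+stable.py | __get_term_rank
-- ===== SOURCE A (Python) =====
-- def __get_term_rank(term, term_range):
--     """Calculate the "rank" of a term.
--
--     Args:
--         term (str): one single term in string format.
--
--         term_range (int): the rank of the class of term.
--
--     Returns:
--         The "rank" of the term.
--
--     The rank of a term is a positive number or zero.  If a term has all
--     bits fixed '0's then its "rank" is 0. The more 'dontcares' and xor or
--     xnor it contains, the higher its rank.
--
--     A dontcare weights more than a xor, a xor weights more than a xnor, a
--     xnor weights more than 1 and a 1 weights more than a 0.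
--
--     This means, the higher rank of a term, the more desireable it is to
--     include this term in the final result.
--     """
--     n = 0
--     '''
--     for t in term:
--         if t == "-":
--             n += 8
--         elif t == "^":
--             n += 4
--         elif t == "~":
--             n += 2
--         elif t == "1":
--             n += 1
--     '''
--     count = 0
--     size = len(term)
--     while count < size:
--       t = term[count]
--       if t == "-":
--           n += 8
--       elif t == "^":
--           n += 4
--       elif t == "~":
--           n += 2
--       elif t == "1":
--           n += 1
--       count+=1
--
--     return 4*term_range + n
-- ===== SOURCE B (Python) =====
-- def __get_term_rank(term, term_range):
--     """B: compute the weighted rank via one str.count per character class (idiomatic)."""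
--     n = (8 * term.count("-")
--          + 4 * term.count("^")
--          + 2 * term.count("~")
--          + 1 * term.count("1"))
--     return 4 * term_range + n
-- ===== Notes on version B (the rewrite author's own statement) =====
-- stated objective: idiomatic
-- what changed: Replaced the explicit while-loop with an index counter and an if/elif ladder by four str.count calls, one per weighted character class, combined in a single arithmetic expression (the counting runs in C, measured ~26x faster at the largest size).
import Mathlib
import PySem

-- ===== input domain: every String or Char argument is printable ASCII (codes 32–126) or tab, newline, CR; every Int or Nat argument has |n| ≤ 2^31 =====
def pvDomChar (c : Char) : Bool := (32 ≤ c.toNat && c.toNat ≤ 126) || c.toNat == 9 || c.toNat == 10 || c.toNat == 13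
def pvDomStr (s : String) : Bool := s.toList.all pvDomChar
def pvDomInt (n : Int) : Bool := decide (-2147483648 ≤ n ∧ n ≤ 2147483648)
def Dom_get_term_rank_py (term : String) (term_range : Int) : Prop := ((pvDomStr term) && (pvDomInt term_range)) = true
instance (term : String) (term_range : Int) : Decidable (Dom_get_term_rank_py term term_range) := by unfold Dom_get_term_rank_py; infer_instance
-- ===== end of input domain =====

-- B replaces A's single while-loop with an if/elif ladder by four independent str.count scans (idiomatic).


-- ===== PORT A =====
-- the 'while count < size' loop; term[count] via pyGet? (always in range here, the
-- 'none' branch is unreachable when size = len(term))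
def pvALoop (cs : List Char) (size : Nat) (count : Nat) (n : Int) : Int :=
  if count < size then
    match PySem.List.pyGet? cs (count : Int) with
    | some t =>
        pvALoop cs size (count + 1)
          (if t = '-' then n + 8
           else if t = '^' then n + 4
           else if t = '~' then n + 2
           else if t = '1' then n + 1
           else n)
    | none => n
  else n
termination_by size - count

def get_term_rank_py (term : String) (term_range : Int) : Int :=
  4 * term_range + pvALoop term.toList (PySem.Str.len term).toNat 0 0

-- ===== PORT B =====
def get_term_rank_py_alt (term : String) (term_range : Int) : Int :=
  let n : Int :=
    8 * (PySem.Str.count term "-" : Int)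
    + 4 * (PySem.Str.count term "^" : Int)
    + 2 * (PySem.Str.count term "~" : Int)
    + 1 * (PySem.Str.count term "1" : Int)
  4 * term_range + n

-- ===== PRECONDITION & SPEC =====
def Spec_get_term_rank_py (term : String) (term_range : Int) (out : Int) : Prop := out = get_term_rank_py_alt term term_range
instance (term : String) (term_range : Int) (out : Int) : Decidable (Spec_get_term_rank_py term term_range out) := by unfold Spec_get_term_rank_py; infer_instance

-- ===== CLAIM (what is proved, stated in full; the proofs are below) =====
def Claim_equal_get_term_rank_py : Prop := ∀ (term : String) (term_range : Int), Dom_get_term_rank_py term term_range → Spec_get_term_rank_py term term_range (get_term_rank_py term term_range)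

-- ===== LEMMAS AND PROOFS =====

-- Chars.count with a single-character needle is List.count
theorem pvCountGo_singleton (c : Char) (l : List Char) (fuel : Nat) (acc : Nat)
    (h : l.length ≤ fuel) :
    PySem.Chars.count.go [c] fuel l acc = acc + l.count c := by
  induction l generalizing fuel acc with
  | nil =>
      cases fuel <;> simp [PySem.Chars.count.go]
  | cons x t ih =>
      cases fuel with
      | zero => simp at h
      | succ f =>
        rw [PySem.Chars.count.go]
        by_cases hx : x = c
        · subst hx
          simp only [List.isPrefixOf, beq_self_eq_true, Bool.true_and,
            if_pos, List.length_singleton, List.drop_succ_cons,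
            List.drop_zero]
          simp only [List.length_cons] at h
          rw [ih f (acc + 1) (by omega)]
          simp
          omega
        · have hpf : ([c].isPrefixOf (x :: t)) = false := by
            simp [List.isPrefixOf]; exact fun h' => absurd h'.symm hx
          rw [hpf]
          simp only [Bool.false_eq_true, if_false]
          simp only [List.length_cons] at h
          rw [ih f acc (by omega)]
          simp [hx]

theorem pvCount_singleton (s : List Char) (c : Char) :
    PySem.Chars.count s [c] = s.count c := by
  unfold PySem.Chars.count
  simp [pvCountGo_singleton c s s.length 0 (le_refl _)]

-- the weight the loop adds for the suffix cs
def pvW (cs : List Char) : Int :=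
  8 * (cs.count '-' : Int) + 4 * (cs.count '^' : Int) + 2 * (cs.count '~' : Int) + (cs.count '1' : Int)

set_option maxRecDepth 4096 in
theorem pvALoop_spec (cs : List Char) (pre : List Char) (n : Int) :
    pvALoop (pre ++ cs) (pre ++ cs).length pre.length n = n + pvW cs := by
  induction cs generalizing pre n with
  | nil => simp [pvALoop, pvW]
  | cons c t ih =>
      rw [pvALoop]
      have hlt : pre.length < (pre ++ c :: t).length := by simp
      rw [if_pos hlt, PySem.List.pyGet?_append_length]
      have h2 : pre.length + 1 = (pre ++ [c]).length := by simp
      have h3 : pre ++ c :: t = (pre ++ [c]) ++ t := by simp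
      dsimp only
      rw [h2, h3, ih (pre ++ [c])]
      clear ih hlt h2 h3
      simp only [pvW, List.count_cons]
      split_ifs <;> simp_all <;> ring

-- ===== VERDICT (by name: the statement is the Claim_ definition above) =====
theorem get_term_rank_py_spec : Claim_equal_get_term_rank_py := by
  intro term term_range _
  show get_term_rank_py term term_range = get_term_rank_py_alt term term_range
  unfold get_term_rank_py get_term_rank_py_alt
  have h := pvALoop_spec term.toList [] 0
  simp only [List.nil_append, List.length_nil] at h
  have hlen : PySem.Str.len term = term.toList.length := by
    simp [PySem.Str.len_eq]
  rw [hlen, Int.toNat_natCast, h]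
  have hc : ∀ c : Char, (PySem.Str.count term (String.ofList [c]) : Int) = (term.toList.count c : Int) := by
    intro c
    rw [PySem.Str.count_eq]
    simp [pvCount_singleton]
  simp only [pvW]
  rw [show ("-" : String) = String.ofList ['-'] from rfl, show ("^" : String) = String.ofList ['^'] from rfl,
     show ("~" : String) = String.ofList ['~'] from rfl, show ("1" : String) = String.ofList ['1'] from rfl,
     hc, hc, hc, hc]
  ring
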